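-- pv_equiv track=rewrite | github.com/anhnguyenvv/RAG_Chatbot | Data/WebDownloads/crawl_fit_pdfs.py | deduplicate_basenames
-- ===== SOURCE A (Python) =====
-- def deduplicate_basenames(pdfs: list[dict]) -> list[dict]:
--     """Ensure unique basenames by appending suffix if needed."""
--     name_counts: dict[str, int] = {}
--     for pdf in pdfs:
--         name = pdf["basename"]
--         if name in name_counts:
--             name_counts[name] += 1
--             pdf["basename"] = f"{name}--{name_counts[name]}"
--         else:
--             name_counts[name] = 1
--     return pdfs
-- ===== SOURCE B (Python) =====
-- def deduplicate_basenames(pdfs: list[dict]) -> list[dict]: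
--     """Ensure unique basenames by appending suffix if needed.
--
--     Group-then-assign shape: first bucket the pdf dicts by their original
--     basename in one pass, then walk each bucket and rename every member
--     after the first with its position in the bucket.  (Mutates the dicts
--     in place, like the original.)
--     """
--     groups: dict[str, list[dict]] = {}
--     for pdf in pdfs:
--         groups.setdefault(pdf["basename"], []).append(pdf)
--     for name, group in groups.items():
--         for i, pdf in enumerate(group):
--             if i > 0:
--                 pdf["basename"] = f"{name}--{i + 1}"
--     return pdfs
-- ===== Notes on version B (the rewrite author's own statement) =====
-- stated objective: alternative
-- what changed: Replaces A's single pass with a running mutable counter by a two-pass group-then-assign shape: first bucket the pdfs by basename with setdefault, then rename each bucket's members after the first by their position in the bucket.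
import Mathlib
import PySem

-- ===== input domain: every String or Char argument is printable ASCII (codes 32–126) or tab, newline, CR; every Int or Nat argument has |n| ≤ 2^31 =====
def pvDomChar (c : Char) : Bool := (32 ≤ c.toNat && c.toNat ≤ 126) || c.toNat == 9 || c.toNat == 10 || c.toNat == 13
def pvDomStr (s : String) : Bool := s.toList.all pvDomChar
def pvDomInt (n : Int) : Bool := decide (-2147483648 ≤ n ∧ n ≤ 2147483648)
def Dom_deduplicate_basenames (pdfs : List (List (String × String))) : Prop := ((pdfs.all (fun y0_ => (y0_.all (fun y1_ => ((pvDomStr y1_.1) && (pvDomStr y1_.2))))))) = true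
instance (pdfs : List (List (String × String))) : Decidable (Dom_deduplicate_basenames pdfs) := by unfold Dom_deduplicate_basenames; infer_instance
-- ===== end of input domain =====

-- B replaces A's one-pass running counter by a two-pass group-then-assign shape (not faster);
-- both Pythons mutate the dicts in place and return the same list object — the Lean
-- equivalence proved here is about the RETURN value (B's buckets hold references, modelled
-- here by list indices).

-- pdf["basename"] (the Pre_ below guarantees the key is present, so the default is never used)
def pvBname (pdf : List (String × String)) : String :=
  (PySem.Dict.mk pdf).getD "basename" ""

-- pdf["basename"] = v
def pvSetBname (pdf : List (String × String)) (v : String) : List (String × String) :=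
  ((PySem.Dict.mk pdf).insert "basename" v).items

-- ===== PORT A =====
-- one loop iteration of A: state = (name_counts, output accumulated so far)
def pvStepA (st : PySem.Dict String Int × List (List (String × String)))
    (pdf : List (String × String)) : PySem.Dict String Int × List (List (String × String)) :=
  let name := pvBname pdf
  match st.1.get? name with
  | some c => (st.1.insert name (c + 1),
               st.2 ++ [pvSetBname pdf (name ++ "--" ++ PySem.Int.toStr (c + 1))])
  | none   => (st.1.insert name 1, st.2 ++ [pdf])

def deduplicate_basenames (pdfs : List (List (String × String))) : List (List (String × String)) :=
  (pdfs.foldl pvStepA (PySem.Dict.empty, [])).2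

-- ===== PORT B =====
-- first pass: groups.setdefault(pdf["basename"], []).append(pdf); the bucket holds the
-- pdfs by reference — modelled as their indices into the list
def pvGroups (pdfs : List (List (String × String))) : PySem.Dict String (List Nat) :=
  (PySem.List.enumerate pdfs).foldl
    (fun d jp => d.insert (pvBname jp.2) (d.getD (pvBname jp.2) [] ++ [jp.1.toNat]))
    PySem.Dict.empty

-- second pass, one bucket: for i, pdf in enumerate(group): if i > 0: pdf["basename"] = f"{name}--{i+1}"
def pvApplyGroup (acc : List (List (String × String))) (it : String × List Nat) :
    List (List (String × String)) :=
  (PySem.List.enumerate it.2).foldl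
    (fun acc ip =>
      if 0 < ip.1 then
        acc.set ip.2 (pvSetBname (acc.getD ip.2 []) (it.1 ++ "--" ++ PySem.Int.toStr (ip.1 + 1)))
      else acc)
    acc

def deduplicate_basenames_alt (pdfs : List (List (String × String))) : List (List (String × String)) :=
  (pvGroups pdfs).items.foldl pvApplyGroup pdfs

-- ===== PRECONDITION & SPEC =====
-- Pre_ excludes pdfs missing the "basename" key (Python A raises KeyError there) and
-- association lists with duplicate keys (those do not represent a Python dict).
def Pre_deduplicate_basenames (pdfs : List (List (String × String))) : Prop :=
  ∀ pdf ∈ pdfs, "basename" ∈ pdf.map Prod.fst ∧ (pdf.map Prod.fst).Nodup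

instance (pdfs : List (List (String × String))) : Decidable (Pre_deduplicate_basenames pdfs) := by
  unfold Pre_deduplicate_basenames; infer_instance

def pvWitness_deduplicate_basenames : (List (List (String × String))) :=
  [[("basename", "a")], [("basename", "a"), ("url", "u")], [("basename", "b")]]

def Spec_deduplicate_basenames (pdfs : List (List (String × String))) (out : List (List (String × String))) : Prop := out = deduplicate_basenames_alt pdfs
instance (pdfs : List (List (String × String))) (out : List (List (String × String))) : Decidable (Spec_deduplicate_basenames pdfs out) := by unfold Spec_deduplicate_basenames; infer_instance

-- ===== CLAIM (what is proved, stated in full; the proofs are below) =====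
def Claim_equal_deduplicate_basenames : Prop := ∀ (pdfs : List (List (String × String))), Dom_deduplicate_basenames pdfs → Pre_deduplicate_basenames pdfs → Spec_deduplicate_basenames pdfs (deduplicate_basenames pdfs)

-- ===== LEMMAS AND PROOFS =====

-- Common reference point of both proofs: element j's suffix number is the count of its
-- basename among the first j+1 basenames; both ports are proved equal to pvAltOut.
def pvOutAt (names : List String) (j : Nat) (pdf : List (String × String)) : List (String × String) :=
  let name := names.getD j ""
  let c := (names.take (j + 1)).count name
  if 1 < c then pvSetBname pdf (name ++ "--" ++ PySem.Int.toStr (c : Int)) else pdf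

def pvAltOut (l : List (List (String × String))) : List (List (String × String)) :=
  (PySem.List.enumerate l).map (fun jp => pvOutAt (l.map pvBname) jp.1.toNat jp.2)

-- ---------- A-side: deduplicate_basenames = pvAltOut ----------

-- A's name_counts after processing a prefix, as its own fold
def pvDictOf (pre : List (List (String × String))) : PySem.Dict String Int :=
  pre.foldl (fun d pdf =>
    match d.get? (pvBname pdf) with
    | some c => d.insert (pvBname pdf) (c + 1)
    | none   => d.insert (pvBname pdf) 1) PySem.Dict.empty

lemma pvDictOf_append_singleton (pre : List (List (String × String))) (pdf : List (String × String)) :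
    pvDictOf (pre ++ [pdf]) =
      (match (pvDictOf pre).get? (pvBname pdf) with
       | some c => (pvDictOf pre).insert (pvBname pdf) (c + 1)
       | none   => (pvDictOf pre).insert (pvBname pdf) 1) := by
  simp [pvDictOf, List.foldl_append]

-- invariant: A's counter maps each name to its occurrence count in the processed prefix
lemma pvDict_counts (pre : List (List (String × String))) : ∀ name : String,
    (pvDictOf pre).get? name =
      if (pre.map pvBname).count name = 0 then none
      else some (((pre.map pvBname).count name : Nat) : Int) := by
  induction pre using List.reverseRecOn with
  | nil => intro name; simp [pvDictOf, PySem.Dict.get?_empty]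
  | append_singleton pre pdf ih =>
    intro name
    rw [pvDictOf_append_singleton]
    have hb := ih (pvBname pdf)
    have hcnt : ((pre ++ [pdf]).map pvBname).count name
        = (pre.map pvBname).count name + (if name = pvBname pdf then 1 else 0) := by
      by_cases h : name = pvBname pdf <;>
        simp [List.count_append, h, eq_comm]
    by_cases h0 : (pre.map pvBname).count (pvBname pdf) = 0
    · rw [if_pos h0] at hb
      rw [hb]
      rw [PySem.Dict.get?_insert, ih name, hcnt]
      by_cases hn : name = pvBname pdf
      · subst hn; simp [h0]
      · simp [hn]
    · rw [if_neg h0] at hb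
      rw [hb]
      rw [PySem.Dict.get?_insert, ih name, hcnt]
      by_cases hn : name = pvBname pdf
      · subst hn; simp [h0]
      · simp [hn]

-- B's reference output over an extended prefix is the output over the prefix plus one element
lemma pvAltOut_append_singleton (pre : List (List (String × String))) (pdf : List (String × String)) :
    pvAltOut (pre ++ [pdf]) =
      pvAltOut pre ++ [pvOutAt ((pre ++ [pdf]).map pvBname) pre.length pdf] := by
  unfold pvAltOut
  rw [PySem.List.enumerate_append]
  simp only [List.map_append, PySem.List.enumerate_cons, PySem.List.enumerate_nil,
    List.map_cons, List.map_nil, zero_add, Int.toNat_natCast]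
  congr 1
  apply List.map_congr_left
  intro jp hjp
  obtain ⟨k, hk, rfl⟩ := (PySem.List.mem_enumerate_iff _ _ _).1 hjp
  simp only [zero_add, Int.toNat_natCast]
  unfold pvOutAt
  have h1 : (List.map pvBname pre ++ [pvBname pdf]).getD k "" = (List.map pvBname pre).getD k "" := by
    rw [List.getD_eq_getElem?_getD, List.getD_eq_getElem?_getD,
      List.getElem?_append_left (by simpa using hk)]
  have h2 : List.take (k + 1) (List.map pvBname pre ++ [pvBname pdf])
      = List.take (k + 1) (List.map pvBname pre) :=
    List.take_append_of_le_length (by simpa using hk)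
  rw [h1, h2]

-- one step of A's fold, from the invariant state, produces the invariant state
lemma pvStepA_inv (pre : List (List (String × String))) (pdf : List (String × String)) :
    pvStepA (pvDictOf pre, pvAltOut pre) pdf = (pvDictOf (pre ++ [pdf]), pvAltOut (pre ++ [pdf])) := by
  rw [pvAltOut_append_singleton, pvDictOf_append_singleton]
  have hname : ((pre ++ [pdf]).map pvBname).getD pre.length "" = pvBname pdf := by
    rw [List.map_append, List.getD_eq_getElem?_getD, List.getElem?_append_right (by simp)]
    simp
  have htake : ((pre ++ [pdf]).map pvBname).take (pre.length + 1) = pre.map pvBname ++ [pvBname pdf] := by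
    rw [List.map_append]
    exact List.take_of_length_le (by simp)
  have hg := pvDict_counts pre (pvBname pdf)
  by_cases h0 : (pre.map pvBname).count (pvBname pdf) = 0
  · rw [if_pos h0] at hg
    simp only [pvStepA, hg, pvOutAt, hname, htake]
    simp [List.count_append, h0]
  · rw [if_neg h0] at hg
    have h1 : 1 < (pre.map pvBname).count (pvBname pdf) + 1 := by omega
    simp only [pvStepA, hg, pvOutAt, hname, htake]
    simp [List.count_append, h1]

-- A's fold from the invariant state computes the reference output on the whole list
lemma pvFold_inv (suf : List (List (String × String))) : ∀ pre : List (List (String × String)),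
    List.foldl pvStepA (pvDictOf pre, pvAltOut pre) suf = (pvDictOf (pre ++ suf), pvAltOut (pre ++ suf)) := by
  induction suf with
  | nil => intro pre; simp
  | cons pdf suf ih =>
    intro pre
    rw [List.foldl_cons, pvStepA_inv, ih (pre ++ [pdf])]
    simp

lemma pvA_eq_altOut (pdfs : List (List (String × String))) :
    deduplicate_basenames pdfs = pvAltOut pdfs := by
  unfold deduplicate_basenames
  have h := pvFold_inv pdfs []
  simp only [List.nil_append] at h
  have h0 : pvDictOf [] = PySem.Dict.empty := rfl
  have h1 : pvAltOut [] = [] := rfl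
  rw [h0, h1] at h
  rw [h]

-- ---------- B-side: deduplicate_basenames_alt = pvAltOut ----------

-- the list of indices at which `name` occurs in `names`
def pvOcc : List String → String → List Nat
  | [], _ => []
  | x :: t, name => (if x = name then [0] else []) ++ (pvOcc t name).map (· + 1)

lemma pvOcc_mem (names : List String) (name : String) (k : Nat) :
    k ∈ pvOcc names name ↔ k < names.length ∧ names.getD k "" = name := by
  induction names generalizing k with
  | nil => simp [pvOcc]
  | cons x t ih =>
    cases k with
    | zero =>
      by_cases h : x = name <;> simp [pvOcc, h]
    | succ k =>
      by_cases h : x = name <;> simp [pvOcc, h, ih]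

lemma pvOcc_length (names : List String) (name : String) :
    (pvOcc names name).length = names.count name := by
  induction names with
  | nil => simp [pvOcc]
  | cons x t ih =>
    by_cases h : x = name <;> simp [pvOcc, h, ih]

lemma pvOcc_append (l1 l2 : List String) (name : String) :
    pvOcc (l1 ++ l2) name = pvOcc l1 name ++ (pvOcc l2 name).map (· + l1.length) := by
  induction l1 with
  | nil => simp [pvOcc]
  | cons x t ih =>
    simp only [List.cons_append, pvOcc, ih, List.map_append, List.map_map, List.length_cons,
      List.append_assoc]
    congr 2

lemma pvOcc_sorted (names : List String) (name : String) :
    (pvOcc names name).Pairwise (· < ·) := by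
  induction names with
  | nil => simp [pvOcc]
  | cons x t ih =>
    have hmap : ((pvOcc t name).map (· + 1)).Pairwise (· < ·) :=
      ih.map _ (by intro a b h; omega)
    by_cases h : x = name
    · have hz : pvOcc (x :: t) name = 0 :: (pvOcc t name).map (· + 1) := by
        simp [pvOcc, h]
      rw [hz]
      refine List.pairwise_cons.2 ⟨?_, hmap⟩
      intro a ha; obtain ⟨b, _, rfl⟩ := List.mem_map.1 ha; omega
    · simpa [pvOcc, h] using hmap

-- first pass builds exactly the occurrence-index buckets
lemma pvGroups_append (pre : List (List (String × String))) (pdf : List (String × String)) :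
    pvGroups (pre ++ [pdf]) =
      (pvGroups pre).insert (pvBname pdf) ((pvGroups pre).getD (pvBname pdf) [] ++ [pre.length]) := by
  unfold pvGroups
  rw [PySem.List.enumerate_append, List.foldl_append]
  simp [PySem.List.enumerate_cons]

lemma pvGroups_get? (pdfs : List (List (String × String))) : ∀ name : String,
    (pvGroups pdfs).get? name =
      if pvOcc (pdfs.map pvBname) name = [] then none else some (pvOcc (pdfs.map pvBname) name) := by
  induction pdfs using List.reverseRecOn with
  | nil => intro name; simp [pvGroups, PySem.List.enumerate_nil, PySem.Dict.get?_empty, pvOcc]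
  | append_singleton pre pdf ih =>
    intro name
    rw [pvGroups_append, PySem.Dict.get?_insert]
    have hocc : pvOcc ((pre ++ [pdf]).map pvBname) name
        = pvOcc (pre.map pvBname) name
          ++ (if pvBname pdf = name then [pre.length] else []) := by
      rw [List.map_append, pvOcc_append]
      by_cases h : pvBname pdf = name <;> simp [pvOcc, h]
    have hgetD : (pvGroups pre).getD (pvBname pdf) [] = pvOcc (pre.map pvBname) (pvBname pdf) := by
      rw [PySem.Dict.getD_eq_get?_getD, ih (pvBname pdf)]
      by_cases h : pvOcc (pre.map pvBname) (pvBname pdf) = [] <;> simp [h]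
    by_cases hn : name = pvBname pdf
    · subst hn
      rw [if_pos rfl, hocc, if_pos rfl, hgetD]
      simp
    · rw [if_neg (fun h : pvBname pdf = name => hn h.symm)] at hocc
      rw [List.append_nil] at hocc
      rw [if_neg hn, hocc]
      exact ih name

lemma pvGroups_keys_nodup (pdfs : List (List (String × String))) :
    (pvGroups pdfs).keys.Nodup := by
  unfold pvGroups
  exact PySem.Dict.nodup_keys_foldl_insert_key (PySem.List.enumerate pdfs)
    (fun jp => pvBname jp.2) (fun d jp => d.getD (pvBname jp.2) [] ++ [jp.1.toNat])
    PySem.Dict.empty PySem.Dict.nodup_keys_empty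

lemma pvGroups_items_occ (pdfs : List (List (String × String)))
    {it : String × List Nat} (hit : it ∈ (pvGroups pdfs).items) :
    it.2 = pvOcc (pdfs.map pvBname) it.1 := by
  obtain ⟨k, v⟩ := it
  have h := PySem.Dict.get?_of_mem_items _ hit (pvGroups_keys_nodup pdfs)
  rw [pvGroups_get? pdfs k] at h
  by_cases h0 : pvOcc (pdfs.map pvBname) k = []
  · rw [if_pos h0] at h; cases h
  · rw [if_neg h0] at h; exact (Option.some_inj.1 h).symm

-- second pass, per position: length preserved, untouched positions, the written position
lemma pvApplyGroup_append (acc : List (List (String × String))) (name : String)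
    (l : List Nat) (x : Nat) :
    pvApplyGroup acc (name, l ++ [x]) =
      (if 0 < (l.length : Int) then
        (pvApplyGroup acc (name, l)).set x
          (pvSetBname ((pvApplyGroup acc (name, l)).getD x [])
            (name ++ "--" ++ PySem.Int.toStr ((l.length : Int) + 1)))
      else pvApplyGroup acc (name, l)) := by
  unfold pvApplyGroup
  rw [PySem.List.enumerate_append, List.foldl_append]
  simp [PySem.List.enumerate_cons]

lemma pvApplyGroup_length (acc : List (List (String × String))) (name : String) (l : List Nat) :
    (pvApplyGroup acc (name, l)).length = acc.length := by
  induction l using List.reverseRecOn with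
  | nil => rfl
  | append_singleton l x ih =>
    rw [pvApplyGroup_append]
    split <;> simp [ih]

lemma pvApplyGroup_not_mem (acc : List (List (String × String))) (name : String) (l : List Nat)
    (j : Nat) (hj : j ∉ l) :
    (pvApplyGroup acc (name, l))[j]? = acc[j]? := by
  induction l using List.reverseRecOn with
  | nil => rfl
  | append_singleton l x ih =>
    have hjl : j ∉ l := fun h => hj (List.mem_append_left _ h)
    have hjx : j ≠ x := fun h => hj (by simp [h])
    rw [pvApplyGroup_append]
    split
    · rw [List.getElem?_set_ne (fun h => hjx h.symm), ih hjl]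
    · exact ih hjl

lemma pvApplyGroup_written (acc : List (List (String × String))) (name : String)
    (L R : List Nat) (j : Nat)
    (hsort : (L ++ j :: R).Pairwise (· < ·)) (hlen : j < acc.length) :
    (pvApplyGroup acc (name, L ++ j :: R))[j]? =
      if L = [] then acc[j]?
      else (acc[j]?).map (fun pdf =>
        pvSetBname pdf (name ++ "--" ++ PySem.Int.toStr ((L.length : Int) + 1))) := by
  induction R using List.reverseRecOn with
  | nil =>
    have hL : ∀ a ∈ L, a < j := by
      intro a ha
      exact (List.pairwise_append.1 hsort).2.2 a ha j (by simp)
    have hjL : j ∉ L := fun h => lt_irrefl j (hL j h)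
    have hbase := pvApplyGroup_not_mem acc name L j hjL
    have hgetD : (pvApplyGroup acc (name, L)).getD j [] = (acc[j]?).getD [] := by
      rw [List.getD_eq_getElem?_getD, hbase]
    rw [show L ++ j :: ([] : List Nat) = L ++ [j] by simp, pvApplyGroup_append]
    by_cases hLnil : L = []
    · subst hLnil; simp [pvApplyGroup]
    · have hpos : 0 < (L.length : Int) := by
        have : L.length ≠ 0 := fun h => hLnil (List.eq_nil_of_length_eq_zero h)
        omega
      rw [if_pos hpos, if_neg hLnil]
      have hjlen : j < (pvApplyGroup acc (name, L)).length := by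
        rw [pvApplyGroup_length]; exact hlen
      rw [List.getElem?_set_self hjlen, hgetD, List.getElem?_eq_getElem hlen]
      simp
  | append_singleton R x ih =>
    have hsort' : (L ++ j :: R).Pairwise (· < ·) := by
      have hsub : List.Sublist (L ++ j :: R) (L ++ j :: (R ++ [x])) :=
        List.Sublist.append_left
          (List.cons_sublist_cons.2 (List.sublist_append_left _ _)) _
      exact hsort.sublist hsub
    have hjx : j ≠ x := by
      have := (List.pairwise_append.1 hsort).2.1
      have hx : j < x := by
        rcases List.pairwise_cons.1 this with ⟨h1, _⟩
        exact h1 x (by simp)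
      omega
    rw [show L ++ j :: (R ++ [x]) = (L ++ j :: R) ++ [x] by simp, pvApplyGroup_append]
    split
    · rw [List.getElem?_set_ne (fun h => hjx h.symm)]
      exact ih hsort'
    · exact ih hsort'

-- outer fold: positions outside every bucket are untouched; length preserved
lemma pvFoldB_not_mem (items : List (String × List Nat)) (acc : List (List (String × String)))
    (j : Nat) (hj : ∀ it ∈ items, j ∉ it.2) :
    (items.foldl pvApplyGroup acc)[j]? = acc[j]? := by
  induction items generalizing acc with
  | nil => rfl
  | cons it items ih =>
    rw [List.foldl_cons, ih _ (fun x hx => hj x (List.mem_cons_of_mem _ hx))]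
    obtain ⟨name, l⟩ := it
    exact pvApplyGroup_not_mem acc name l j (hj _ (List.mem_cons_self ..))

lemma pvFoldB_length (items : List (String × List Nat)) (acc : List (List (String × String))) :
    (items.foldl pvApplyGroup acc).length = acc.length := by
  induction items generalizing acc with
  | nil => rfl
  | cons it items ih =>
    rw [List.foldl_cons, ih]
    obtain ⟨name, l⟩ := it
    exact pvApplyGroup_length acc name l

-- the reference output, elementwise
lemma pvAltOut_getElem? (pdfs : List (List (String × String))) (j : Nat) :
    (pvAltOut pdfs)[j]? = (pdfs[j]?).map (pvOutAt (pdfs.map pvBname) j) := by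
  unfold pvAltOut
  rw [List.getElem?_map, PySem.List.getElem?_enumerate]
  cases pdfs[j]? <;> simp

lemma pvB_eq_altOut (pdfs : List (List (String × String))) :
    deduplicate_basenames_alt pdfs = pvAltOut pdfs := by
  unfold deduplicate_basenames_alt
  apply List.ext_getElem?
  intro j
  rw [pvAltOut_getElem?]
  by_cases hj : j < pdfs.length
  swap
  · rw [List.getElem?_eq_none (by rw [pvFoldB_length]; omega),
      List.getElem?_eq_none (by omega), Option.map_none]
  -- position j is in range; set up the bucket containing it
  have hnames : (pdfs.map pvBname).length = pdfs.length := List.length_map ..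
  set names := pdfs.map pvBname with hnamesdef
  set name := names.getD j "" with hnamedef
  have hjmem : j ∈ pvOcc names name := (pvOcc_mem names name j).2 ⟨by omega, rfl⟩
  have hocc_ne : pvOcc names name ≠ [] := fun h => by simp [h] at hjmem
  have hget : (pvGroups pdfs).get? name = some (pvOcc names name) := by
    rw [pvGroups_get? pdfs name, if_neg hocc_ne]
  have hmemit : (name, pvOcc names name) ∈ (pvGroups pdfs).items :=
    PySem.Dict.mem_items_of_get?_eq_some _ hget
  obtain ⟨P, Q, hPQ⟩ := List.append_of_mem hmemit
  -- every other bucket misses position j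
  have hkeys := pvGroups_keys_nodup pdfs
  have hkeys' : ((pvGroups pdfs).items.map Prod.fst).Nodup := hkeys
  rw [hPQ] at hkeys'
  simp only [List.map_append, List.map_cons, List.nodup_append, List.nodup_cons] at hkeys'
  have hother : ∀ it ∈ P ++ Q, j ∉ it.2 := by
    intro it hit
    have hitems : it ∈ (pvGroups pdfs).items := by
      rw [hPQ]
      rcases List.mem_append.1 hit with h | h
      · exact List.mem_append_left _ h
      · exact List.mem_append_right _ (List.mem_cons_of_mem _ h)
    have hocc := pvGroups_items_occ pdfs hitems
    have hne : it.1 ≠ name := by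
      rcases List.mem_append.1 hit with h | h
      · exact hkeys'.2.2 it.1 (List.mem_map.2 ⟨it, h, rfl⟩) name (List.mem_cons_self ..)
      · intro he
        exact hkeys'.2.1.1 (List.mem_map.2 ⟨it, h, he⟩)
    intro hjit
    rw [hocc] at hjit
    have h2 := ((pvOcc_mem names it.1 j).1 hjit).2
    rw [← hnamedef] at h2
    exact hne h2.symm
  -- unfold the outer fold around the bucket of j
  rw [hPQ, List.foldl_append, List.foldl_cons]
  rw [pvFoldB_not_mem Q _ j (fun it h => hother it (List.mem_append_right _ h))]
  have haccP_len : (P.foldl pvApplyGroup pdfs).length = pdfs.length := pvFoldB_length P pdfs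
  have haccP : (P.foldl pvApplyGroup pdfs)[j]? = pdfs[j]? :=
    pvFoldB_not_mem P pdfs j (fun it h => hother it (List.mem_append_left _ h))
  -- decompose the bucket around j
  have hgetj : names[j] = name := by
    rw [hnamedef, List.getD_eq_getElem?_getD, List.getElem?_eq_getElem (by omega)]
    rfl
  have hdrop : names.drop j = name :: names.drop (j + 1) := by
    rw [List.drop_eq_getElem_cons (by omega), hgetj]
  have hdecomp : pvOcc names name =
      pvOcc (names.take j) name ++ j ::
        (((pvOcc (names.drop (j + 1)) name).map (· + 1)).map (· + j)) := by
    conv_lhs => rw [← List.take_append_drop j names]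
    rw [pvOcc_append, hdrop]
    have hlen : (names.take j).length = j := List.length_take_of_le (by omega)
    have hhead : pvOcc (name :: names.drop (j + 1)) name
        = 0 :: (pvOcc (names.drop (j + 1)) name).map (· + 1) := by
      simp [pvOcc]
    rw [hhead, hlen]
    simp
  have hsorted : (pvOcc (names.take j) name ++ j ::
      (((pvOcc (names.drop (j + 1)) name).map (· + 1)).map (· + j))).Pairwise (· < ·) := by
    rw [← hdecomp]; exact pvOcc_sorted names name
  rw [hdecomp]
  rw [pvApplyGroup_written _ name _ _ j hsorted (by omega), haccP]
  -- compare with the reference value at j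
  have hLlen : (pvOcc (names.take j) name).length = (names.take j).count name :=
    pvOcc_length _ name
  have htakes : names.take (j + 1) = names.take j ++ [name] := by
    rw [List.take_add_one, List.getElem?_eq_getElem (by omega), hgetj]
    rfl
  have hc : (names.take (j + 1)).count name = (names.take j).count name + 1 := by
    rw [htakes]; simp
  rw [List.getElem?_eq_getElem hj]
  simp only [pvOutAt, Option.map_some, ← hnamedef, hc]
  by_cases hL : pvOcc (names.take j) name = []
  · have h0 : (names.take j).count name = 0 := by rw [← hLlen, hL]; rfl
    rw [if_pos hL, h0]
    simp
  · have harg : ((pvOcc (names.take j) name).length : Int) + 1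
        = (((names.take j).count name + 1 : Nat) : Int) := by
      rw [hLlen]; push_cast; ring
    have h1 : 1 < (names.take j).count name + 1 := by
      have : (names.take j).count name ≠ 0 :=
        fun h => hL (List.eq_nil_of_length_eq_zero (hLlen.trans h))
      omega
    rw [if_neg hL, harg, if_pos h1]

-- ===== VERDICT (by name: the statement is the Claim_ definition above) =====
theorem deduplicate_basenames_spec : Claim_equal_deduplicate_basenames := by
  intro pdfs _ _
  unfold Spec_deduplicate_basenames
  rw [pvA_eq_altOut, pvB_eq_altOut]
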